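-- pv_equiv track=rewrite | github.com/liuwei283/PSHIC | sim/datasets_simulation.py | check_snp_coverage
-- ===== SOURCE A (Python) =====
-- read_length = 70
--
-- def check_snp_coverage(bin_snp, start, phasing_info):
--     is_covered = False
--     count = 0
--     snp_info = []
--     for snp in bin_snp:
--         if snp >= (start + read_length):
--             break
--         if snp >= start and snp < start + read_length:
--             snp_info.append(phasing_info[count])
--         count += 1
--     if all(x == 0 for x in snp_info):
--         hap_info = 0
--     elif all(x == 1 for x in snp_info):
--         hap_info = 1
--     else:
--         hap_info = -1
--     is_covered = len(snp_info) > 0 and (hap_info == 0 or hap_info == 1)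
--
--     return is_covered, hap_info
-- ===== SOURCE B (Python) =====
-- read_length = 70
--
-- def check_snp_coverage(bin_snp, start, phasing_info):
--     end = start + read_length
--     saw0 = saw1 = saw_other = False
--     for snp, hap in zip(bin_snp, phasing_info):
--         if snp >= end:
--             break
--         if snp >= start:
--             if hap == 0:
--                 saw0 = True
--             elif hap == 1:
--                 saw1 = True
--             else:
--                 saw_other = True
--     if not (saw0 or saw1 or saw_other):
--         return False, 0
--     if saw0 and not (saw1 or saw_other):
--         return True, 0
--     if saw1 and not (saw0 or saw_other):
--         return True, 1
--     return False, -1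
-- ===== Notes on version B (the rewrite author's own statement) =====
-- stated objective: alternative
-- what changed: B drops A's snp_info list, running counter and two staged all() passes entirely: it makes a single pass over zip(bin_snp, phasing_info) maintaining three boolean flags (saw 0 / saw 1 / saw other) and classifies from the flags.
import Mathlib
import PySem

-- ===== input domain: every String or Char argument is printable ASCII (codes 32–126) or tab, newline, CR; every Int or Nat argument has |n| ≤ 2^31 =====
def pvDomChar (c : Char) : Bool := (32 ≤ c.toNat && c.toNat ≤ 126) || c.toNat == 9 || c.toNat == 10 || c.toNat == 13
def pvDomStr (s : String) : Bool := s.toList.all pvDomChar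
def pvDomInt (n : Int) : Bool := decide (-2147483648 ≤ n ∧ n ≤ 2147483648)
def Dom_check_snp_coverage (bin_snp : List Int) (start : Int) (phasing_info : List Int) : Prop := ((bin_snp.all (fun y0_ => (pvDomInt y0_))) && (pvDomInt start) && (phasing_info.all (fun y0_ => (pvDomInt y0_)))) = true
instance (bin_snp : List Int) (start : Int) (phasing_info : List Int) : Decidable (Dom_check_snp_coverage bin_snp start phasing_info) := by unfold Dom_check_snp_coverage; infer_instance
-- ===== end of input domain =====

-- B replaces A's snp_info list, counter indexing and two staged all() passes by a single pass
-- over the zipped (snp, haplotype) pairs maintaining three boolean flags (alternative decomposition, same cost).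


-- ===== PORT A =====
-- A's loop: break at the first snp ≥ start+70, append phasing_info[count] for window snps.
-- phasing_info[count] is PySem.List.pyGetD (exact under Pre_, which puts count in range).
def goA (start : Int) (phasing_info : List Int) : List Int → Int → List Int → List Int
  | [], _, acc => acc
  | snp :: rest, count, acc =>
    if start + 70 ≤ snp then acc
    else if start ≤ snp ∧ snp < start + 70 then
      goA start phasing_info rest (count + 1) (acc ++ [PySem.List.pyGetD phasing_info count 0])
    else
      goA start phasing_info rest (count + 1) acc

def check_snp_coverage (bin_snp : List Int) (start : Int) (phasing_info : List Int) : Bool × Int :=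
  let snp_info := goA start phasing_info bin_snp 0 []
  let hap_info : Int :=
    if snp_info.all (fun x => x == 0) then 0
    else if snp_info.all (fun x => x == 1) then 1
    else -1
  (decide (0 < snp_info.length) && (hap_info == 0 || hap_info == 1), hap_info)

-- ===== PORT B =====
-- flag update for one in-window haplotype (the if/elif/else of Source B)
def updB (f : Bool × Bool × Bool) (hap : Int) : Bool × Bool × Bool :=
  if hap == 0 then (true, f.2.1, f.2.2)
  else if hap == 1 then (f.1, true, f.2.2)
  else (f.1, f.2.1, true)

def goB (start : Int) : List (Int × Int) → Bool × Bool × Bool → Bool × Bool × Bool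
  | [], f => f
  | (snp, hap) :: rest, f =>
    if start + 70 ≤ snp then f
    else if start ≤ snp then goB start rest (updB f hap)
    else goB start rest f

def check_snp_coverage_alt (bin_snp : List Int) (start : Int) (phasing_info : List Int) : Bool × Int :=
  let f := goB start (bin_snp.zip phasing_info) (false, false, false)
  if !(f.1 || f.2.1 || f.2.2) then (false, 0)
  else if f.1 && !(f.2.1 || f.2.2) then (true, 0)
  else if f.2.1 && !(f.1 || f.2.2) then (true, 1)
  else (false, -1)

-- ===== PRECONDITION & SPEC =====
-- Pre_ excludes exactly the inputs where A raises IndexError: a SNP inside the read window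
-- whose position index is ≥ len(phasing_info).
def Pre_check_snp_coverage (bin_snp : List Int) (start : Int) (phasing_info : List Int) : Prop :=
  ∀ p ∈ (bin_snp.takeWhile (fun s => decide (s < start + 70))).zipIdx,
    start ≤ p.1 → p.2 < phasing_info.length
instance (bin_snp : List Int) (start : Int) (phasing_info : List Int) : Decidable (Pre_check_snp_coverage bin_snp start phasing_info) := by unfold Pre_check_snp_coverage; infer_instance

def pvWitness_check_snp_coverage : List Int × Int × List Int := ([10, 80], 0, [1])

def Spec_check_snp_coverage (bin_snp : List Int) (start : Int) (phasing_info : List Int) (out : Bool × Int) : Prop := out = check_snp_coverage_alt bin_snp start phasing_info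
instance (bin_snp : List Int) (start : Int) (phasing_info : List Int) (out : Bool × Int) : Decidable (Spec_check_snp_coverage bin_snp start phasing_info out) := by unfold Spec_check_snp_coverage; infer_instance

-- ===== CLAIM (what is proved, stated in full; the proofs are below) =====
def Claim_equal_check_snp_coverage : Prop := ∀ (bin_snp : List Int) (start : Int) (phasing_info : List Int), Dom_check_snp_coverage bin_snp start phasing_info → Pre_check_snp_coverage bin_snp start phasing_info → Spec_check_snp_coverage bin_snp start phasing_info (check_snp_coverage bin_snp start phasing_info)

-- ===== LEMMAS AND PROOFS =====

-- A's loop equals the zip/filterMap over the takeWhile prefix, when indices stay in range.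
theorem goA_eq_spec (start : Int) (pi : List Int) (l : List Int) :
    ∀ (c : Nat) (acc : List Int),
    (∀ p ∈ (l.takeWhile (fun s => decide (s < start + 70))).zipIdx,
        start ≤ p.1 → c + p.2 < pi.length) →
    goA start pi l (c : Int) acc =
      acc ++ ((l.takeWhile (fun s => decide (s < start + 70))).zip (pi.drop c)).filterMap
        (fun q => if start ≤ q.1 then some q.2 else none) := by
  induction l with
  | nil => intro c acc _; simp [goA]
  | cons snp rest ih =>
    intro c acc hpre
    by_cases h1 : start + 70 ≤ snp
    · simp [goA, h1, show ¬ snp < start + 70 by omega]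
    · have hlt : snp < start + 70 := by omega
      have htw : (snp :: rest).takeWhile (fun s => decide (s < start + 70)) =
          snp :: rest.takeWhile (fun s => decide (s < start + 70)) := by
        simp [hlt]
      have hrest : ∀ p ∈ (rest.takeWhile (fun s => decide (s < start + 70))).zipIdx,
          start ≤ p.1 → (c + 1) + p.2 < pi.length := by
        intro p hp hs
        obtain ⟨x, i⟩ := p
        obtain ⟨-, hi, hx⟩ := List.mem_zipIdx hp
        have : (x, i + 1) ∈ ((snp :: rest).takeWhile (fun s => decide (s < start + 70))).zipIdx := by
          rw [htw, List.zipIdx_cons]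
          refine List.mem_cons_of_mem _ ?_
          rw [List.mem_zipIdx_iff_le_and_getElem?_sub]
          simp at hi
          simp [hx, hi]
        have := hpre _ this hs
        omega
      by_cases h2 : start ≤ snp
      · have hc : c < pi.length := by
          have : (snp, 0) ∈ ((snp :: rest).takeWhile (fun s => decide (s < start + 70))).zipIdx := by
            rw [htw, List.zipIdx_cons]; exact List.mem_cons_self
          have := hpre _ this h2
          omega
        have hdrop : pi.drop c = pi[c] :: pi.drop (c + 1) :=
          List.drop_eq_getElem_cons hc
        have hget : PySem.List.pyGetD pi (c : Int) 0 = pi[c] := by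
          rw [PySem.List.pyGetD_natCast]
          exact List.getD_eq_getElem pi 0 hc
        have hstep : goA start pi (snp :: rest) (c : Int) acc =
            goA start pi rest ((c : Int) + 1) (acc ++ [PySem.List.pyGetD pi (c : Int) 0]) := by
          simp [goA, h1, h2, hlt]
        rw [hstep, hget]
        have := ih (c + 1) (acc ++ [pi[c]]) hrest
        push_cast at this
        rw [this, htw, hdrop]
        simp [h2, -List.getElem_cons_drop]
      · have hstep : goA start pi (snp :: rest) (c : Int) acc =
            goA start pi rest ((c : Int) + 1) acc := by
          simp [goA, h1, h2]
        rw [hstep]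
        have := ih (c + 1) acc hrest
        push_cast at this
        rw [this, htw]
        cases hd : pi.drop c with
        | nil =>
          have h3 : pi.drop (c + 1) = [] := by rw [← List.tail_drop, hd]; rfl
          simp [h3]
        | cons x xs =>
          have h3 : pi.drop (c + 1) = xs := by rw [← List.tail_drop, hd]; rfl
          simp [h3, h2]

-- B's loop over the zip equals folding the flag update over the same filterMap selection.
theorem goB_eq_spec (st : Int) (l : List Int) :
    ∀ (pid : List Int) (f : Bool × Bool × Bool),
    goB st (l.zip pid) f =
      (((l.takeWhile (fun s => decide (s < st + 70))).zip pid).filterMap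
        (fun q => if st ≤ q.1 then some q.2 else none)).foldl updB f := by
  induction l with
  | nil => intro pid f; simp [goB]
  | cons snp rest ih =>
    intro pid f
    cases pid with
    | nil => cases htw : (snp :: rest).takeWhile (fun s => decide (s < st + 70)) <;> simp [goB]
    | cons h pt =>
      by_cases h1 : st + 70 ≤ snp
      · simp [goB, h1, show ¬ snp < st + 70 by omega]
      · have hlt : snp < st + 70 := by omega
        by_cases h2 : st ≤ snp
        · simp [goB, h1, h2, hlt, ih]
        · simp [goB, h1, h2, hlt, ih]

-- the folded flags are exactly the three "any" tests over the selected haplotypes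
theorem foldl_updB_spec (S : List Int) :
    ∀ f : Bool × Bool × Bool,
    S.foldl updB f =
      (f.1 || S.any (fun x => x == 0), f.2.1 || S.any (fun x => x == 1),
       f.2.2 || S.any (fun x => decide (x ≠ 0 ∧ x ≠ 1))) := by
  induction S with
  | nil => intro f; simp
  | cons h t ih =>
    intro f
    by_cases h0 : h = 0
    · subst h0; simp [updB, ih]
    · by_cases h1 : h = 1
      · subst h1; simp [updB, ih]
      · have e0 : (h == (0:Int)) = false := by simp [h0]
        have e1 : (h == (1:Int)) = false := by simp [h1]
        simp [updB, e0, e1, h0, h1, ih]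

theorem all0_of (S : List Int) (hA1 : S.any (fun x => x == 1) = false)
    (hAo : S.any (fun x => decide (x ≠ 0 ∧ x ≠ 1)) = false) :
    S.all (fun x => x == 0) = true := by
  simp only [List.all_eq_true, List.any_eq_false] at *
  intro x hx
  have := hA1 x hx
  have := hAo x hx
  simp at *
  omega

theorem all1_of (S : List Int) (hA0 : S.any (fun x => x == 0) = false)
    (hAo : S.any (fun x => decide (x ≠ 0 ∧ x ≠ 1)) = false) :
    S.all (fun x => x == 1) = true := by
  simp only [List.all_eq_true, List.any_eq_false] at *
  intro x hx
  have := hA0 x hx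
  have := hAo x hx
  simp at *
  omega

-- ===== VERDICT (by name: the statement is the Claim_ definition above) =====
theorem check_snp_coverage_spec : Claim_equal_check_snp_coverage := by
  intro bs st pi _ hpre
  unfold Spec_check_snp_coverage check_snp_coverage check_snp_coverage_alt
  unfold Pre_check_snp_coverage at hpre
  have hA := goA_eq_spec st pi bs 0 []
      (by intro p hp hs; have := hpre p hp hs; omega)
  simp only [Nat.cast_zero, List.drop_zero, List.nil_append] at hA
  rw [hA, goB_eq_spec, foldl_updB_spec]
  set S := ((bs.takeWhile (fun s : Int => decide (s < st + 70))).zip pi).filterMap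
      (fun q => if st ≤ q.1 then some q.2 else none) with hSdef
  cases hS : S with
  | nil => simp
  | cons h0 t =>
    set a0 := (h0 :: t).any (fun x => x == 0) with ha0
    set a1 := (h0 :: t).any (fun x => x == 1) with ha1
    set ao := (h0 :: t).any (fun x => decide (x ≠ 0 ∧ x ≠ 1)) with hao
    have hsome : a0 || a1 || ao = true := by
      by_cases h00 : h0 = 0
      · have : a0 = true := by rw [ha0]; subst h00; simp
        simp [this]
      · by_cases h01 : h0 = 1
        · have : a1 = true := by rw [ha1]; subst h01; simp
          simp [this]
        · have : ao = true := by rw [hao]; simp; exact Or.inl ⟨h00, h01⟩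
          simp [this]
    cases hc0 : a0 <;> cases hc1 : a1 <;> cases hco : ao
    · rw [hc0, hc1, hco] at hsome; simp at hsome
    · -- only "other": not all0 (some other elt) — need all0 false, all1 false
      have hna0 : (h0 :: t).all (fun x => x == 0) = false := by
        rw [ha0] at hc0
        by_contra hcon
        simp only [Bool.not_eq_false, List.all_eq_true] at hcon
        simp only [List.any_eq_false] at hc0
        have := hc0 h0 List.mem_cons_self
        have := hcon h0 List.mem_cons_self
        simp at *; omega
      have hna1 : (h0 :: t).all (fun x => x == 1) = false := by
        rw [ha1] at hc1
        by_contra hcon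
        simp only [Bool.not_eq_false, List.all_eq_true] at hcon
        simp only [List.any_eq_false] at hc1
        have := hc1 h0 List.mem_cons_self
        have := hcon h0 List.mem_cons_self
        simp at *; omega
      simp [hna0, hna1]
    · -- only ones
      have h1 : (h0 :: t).all (fun x => x == 1) = true := all1_of _ (ha0 ▸ hc0) (hao ▸ hco)
      have h0f : (h0 :: t).all (fun x => x == 0) = false := by
        rw [ha1] at hc1
        by_contra hcon
        simp only [Bool.not_eq_false, List.all_eq_true] at hcon
        rcases (List.any_eq_true).mp hc1 with ⟨x, hx, hx1⟩
        have := hcon x hx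
        simp at *; omega
      simp [h1, h0f]
    · -- ones and other
      have h1 : (h0 :: t).all (fun x => x == 1) = false := by
        rw [hao] at hco
        rcases (List.any_eq_true).mp hco with ⟨x, hx, hxo⟩
        by_contra hcon
        simp only [Bool.not_eq_false, List.all_eq_true] at hcon
        have := hcon x hx
        simp at *; omega
      have h0f : (h0 :: t).all (fun x => x == 0) = false := by
        rw [ha1] at hc1
        rcases (List.any_eq_true).mp hc1 with ⟨x, hx, hx1⟩
        by_contra hcon
        simp only [Bool.not_eq_false, List.all_eq_true] at hcon
        have := hcon x hx
        simp at *; omega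
      simp [h1, h0f]
    · -- only zeros
      have h0t : (h0 :: t).all (fun x => x == 0) = true := all0_of _ (ha1 ▸ hc1) (hao ▸ hco)
      simp [h0t]
    · -- zeros and other
      have h0f : (h0 :: t).all (fun x => x == 0) = false := by
        rw [hao] at hco
        rcases (List.any_eq_true).mp hco with ⟨x, hx, hxo⟩
        by_contra hcon
        simp only [Bool.not_eq_false, List.all_eq_true] at hcon
        have := hcon x hx
        simp at *; omega
      have h1f : (h0 :: t).all (fun x => x == 1) = false := by
        rw [ha0] at hc0
        rcases (List.any_eq_true).mp hc0 with ⟨x, hx, hx0⟩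
        by_contra hcon
        simp only [Bool.not_eq_false, List.all_eq_true] at hcon
        have := hcon x hx
        simp at *; omega
      simp [h0f, h1f]
    · -- zeros and ones
      have h0f : (h0 :: t).all (fun x => x == 0) = false := by
        rw [ha1] at hc1
        rcases (List.any_eq_true).mp hc1 with ⟨x, hx, hx1⟩
        by_contra hcon
        simp only [Bool.not_eq_false, List.all_eq_true] at hcon
        have := hcon x hx
        simp at *; omega
      have h1f : (h0 :: t).all (fun x => x == 1) = false := by
        rw [ha0] at hc0
        rcases (List.any_eq_true).mp hc0 with ⟨x, hx, hx0⟩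
        by_contra hcon
        simp only [Bool.not_eq_false, List.all_eq_true] at hcon
        have := hcon x hx
        simp at *; omega
      simp [h0f, h1f]
    · -- all three
      have h0f : (h0 :: t).all (fun x => x == 0) = false := by
        rw [ha1] at hc1
        rcases (List.any_eq_true).mp hc1 with ⟨x, hx, hx1⟩
        by_contra hcon
        simp only [Bool.not_eq_false, List.all_eq_true] at hcon
        have := hcon x hx
        simp at *; omega
      have h1f : (h0 :: t).all (fun x => x == 1) = false := by
        rw [ha0] at hc0
        rcases (List.any_eq_true).mp hc0 with ⟨x, hx, hx0⟩
        by_contra hcon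
        simp only [Bool.not_eq_false, List.all_eq_true] at hcon
        have := hcon x hx
        simp at *; omega
      simp [h0f, h1f]
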